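-- pv_equiv track=rewrite | github.com/lukaszkurczab/food-scanner-ai-backend | app/services/notification_service.py | _normalize_days
-- ===== SOURCE A (Python) =====
-- DEFAULT_DAYS = [1, 2, 3, 4, 5, 6, 0]
--
-- class NotificationValidationError(Exception):
--     """Raised when the notification payload is invalid."""
--
-- def _normalize_days(raw: object) -> list[int]:
--     if not isinstance(raw, list):
--         raise NotificationValidationError("Invalid notification days.")
--     raw_days: list[object] = raw
--     days = sorted(
--         {
--             int(day)
--             for day in raw_days
--             if isinstance(day, int) and 0 <= day <= 6
--         }
--     )
--     if len(days) != len(raw_days):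
--         raise NotificationValidationError("Invalid notification days.")
--     return days or list(DEFAULT_DAYS)
-- ===== SOURCE B (Python) =====
-- DEFAULT_DAYS = [1, 2, 3, 4, 5, 6, 0]
--
-- class NotificationValidationError(Exception):
--     """Raised when the notification payload is invalid."""
--
-- def _normalize_days(raw: object) -> list[int]:
--     if not isinstance(raw, list):
--         raise NotificationValidationError("Invalid notification days.")
--     seen = set()
--     collected = []
--     for day in raw:
--         if not (isinstance(day, int) and 0 <= day <= 6):
--             raise NotificationValidationError("Invalid notification days.")
--         d = int(day)
--         if d in seen:
--             raise NotificationValidationError("Invalid notification days.")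
--         seen.add(d)
--         collected.append(d)
--     return sorted(collected) or list(DEFAULT_DAYS)
-- ===== Notes on version B (the rewrite author's own statement) =====
-- stated objective: alternative
-- what changed: Replaces the set-comprehension-plus-length-comparison trick with a single explicit pass that validates each element eagerly, detects duplicates via a seen-set as it goes, and sorts the collected values at the end.
import Mathlib
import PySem

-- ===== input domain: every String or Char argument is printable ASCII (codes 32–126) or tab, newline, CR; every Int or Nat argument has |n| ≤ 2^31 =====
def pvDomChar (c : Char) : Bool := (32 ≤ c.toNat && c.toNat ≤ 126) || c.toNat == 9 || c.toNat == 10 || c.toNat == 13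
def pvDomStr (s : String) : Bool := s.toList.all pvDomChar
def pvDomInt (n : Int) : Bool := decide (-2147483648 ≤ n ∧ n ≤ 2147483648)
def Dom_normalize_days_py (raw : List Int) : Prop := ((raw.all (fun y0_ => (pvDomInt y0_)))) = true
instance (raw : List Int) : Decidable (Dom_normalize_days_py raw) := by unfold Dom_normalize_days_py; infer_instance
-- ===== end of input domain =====

-- B replaces A's set-comprehension + length-comparison with one explicit validating pass
-- (seen-set, eager duplicate detection), sorting the collected values at the end; alternative decomposition.

-- ===== PORT A =====
-- days = sorted({int(day) for day in raw_days if 0 <= day <= 6}); on a List Int the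
-- isinstance guard is always true. Where Python raises (len mismatch) the port returns []
-- (excluded by Pre_).
def normalize_days_py (raw : List Int) : List Int :=
  let days := PySem.List.sorted
    (PySem.Set.ofList (raw.filter (fun day => decide (0 ≤ day ∧ day ≤ 6)))) (fun x => x) false
  if days.length ≠ raw.length then []
  else if days = [] then [1, 2, 3, 4, 5, 6, 0] else days

-- ===== PORT B =====
-- the single validating loop of Source B; none = NotificationValidationError
def normalizeDaysLoop : List Int → PySem.Set Int → List Int → Option (List Int)
  | [], _, collected => some collected
  | day :: rest, seen, collected =>
    if ¬ (0 ≤ day ∧ day ≤ 6) then none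
    else if PySem.Set.contains seen day then none
    else normalizeDaysLoop rest (PySem.Set.add seen day) (collected ++ [day])

def normalize_days_py_alt (raw : List Int) : List Int :=
  match normalizeDaysLoop raw PySem.Set.empty [] with
  | none => []  -- Python B raises here (excluded by Pre_)
  | some collected =>
      let s := PySem.List.sorted collected (fun x => x) false
      if s = [] then [1, 2, 3, 4, 5, 6, 0] else s

-- ===== PRECONDITION & SPEC =====
-- Pre_ excludes exactly the inputs on which A raises NotificationValidationError:
-- an element outside 0..6 or a duplicate element.
def Pre_normalize_days_py (raw : List Int) : Prop :=
  (∀ d ∈ raw, 0 ≤ d ∧ d ≤ 6) ∧ raw.Nodup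
instance (raw : List Int) : Decidable (Pre_normalize_days_py raw) := by
  unfold Pre_normalize_days_py; infer_instance
def pvWitness_normalize_days_py : List Int := ([3, 0, 5] : List Int)

def Spec_normalize_days_py (raw : List Int) (out : List Int) : Prop := out = normalize_days_py_alt raw
instance (raw : List Int) (out : List Int) : Decidable (Spec_normalize_days_py raw out) := by
  unfold Spec_normalize_days_py; infer_instance

-- ===== CLAIM (what is proved, stated in full; the proofs are below) =====
def Claim_equal_normalize_days_py : Prop := ∀ (raw : List Int), Dom_normalize_days_py raw → Pre_normalize_days_py raw → Spec_normalize_days_py raw (normalize_days_py raw)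

-- ===== LEMMAS AND PROOFS =====
lemma normalizeDaysLoop_valid (raw : List Int) :
    ∀ (seen : PySem.Set Int) (collected : List Int),
    (∀ d ∈ raw, 0 ≤ d ∧ d ≤ 6) → raw.Nodup → (∀ d ∈ raw, d ∉ seen) →
    normalizeDaysLoop raw seen collected = some (collected ++ raw) := by
  induction raw with
  | nil => intro seen collected _ _ _; simp [normalizeDaysLoop]
  | cons day rest ih =>
    intro seen collected hrange hnd hseen
    have h1 := hrange day (by simp)
    have h2 : ¬ (PySem.Set.contains seen day = true) := by
      simpa [PySem.Set.contains_iff] using hseen day (by simp)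
    simp only [normalizeDaysLoop, h1, h2]
    rw [ih (PySem.Set.add seen day) (collected ++ [day])
          (fun d hd => hrange d (by simp [hd]))
          (List.nodup_cons.mp hnd).2
          (fun d hd => by
            rw [PySem.Set.mem_add]
            push Not
            exact ⟨hseen d (by simp [hd]), fun h => (List.nodup_cons.mp hnd).1 (h ▸ hd)⟩)]
    simp

-- ===== VERDICT (by name: the statement is the Claim_ definition above) =====
theorem normalize_days_py_spec : Claim_equal_normalize_days_py := by
  intro raw _ ⟨hrange, hnd⟩
  unfold Spec_normalize_days_py normalize_days_py normalize_days_py_alt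
  rw [normalizeDaysLoop_valid raw PySem.Set.empty [] hrange hnd (by simp [PySem.Set.empty])]
  have hfilter : raw.filter (fun day => decide (0 ≤ day ∧ day ≤ 6)) = raw :=
    List.filter_eq_self.mpr (fun d hd => by simpa using hrange d hd)
  have hof : PySem.Set.ofList raw = raw := PySem.Set.ofList_eq_self_of_nodup raw hnd
  simp only [hfilter, hof, List.nil_append]
  rw [if_neg (by simp [PySem.List.length_sorted])]
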